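-- pv_equiv track=rewrite | github.com/Ignatella/AGH | SEM_1/python/Ex 2018/set_of_numbers_in_multidimensional_array/main.py | check_array
-- ===== SOURCE A (Python) =====
-- def check_nums(num1, num2, num3):
--     nums = []
--     for num in [num1, num2, num3]:
--         for letter in str(num):
--             if letter.isdigit():
--                 if letter not in nums:
--                     nums.append(letter)
--                 else:
--                     return False
--
--     if len(nums) == 10:
--         return True
--
--     return False
--
-- def check_square(array, x, y, square_size):
--     num1 = array[x][y]
--     num2 = array[x][y + square_size - 1]
--     num3 = array[x + square_size - 1][y + square_size - 1]
--     num4 = array[x + square_size - 1][y]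
--
--     res1 = check_nums(num1, num2, num3)
--     res2 = check_nums(num1, num3, num4)
--     res3 = check_nums(num1, num2, num4)
--     res4 = check_nums(num2, num3, num4)
--
--     return res1 or res2 or res3 or res4
--
-- def check_array(array, square_size=2):
--     if square_size > len(array):
--         return 0
--
--     bound = len(array) - square_size + 1
--     for i in range(bound):
--         for j in range(bound):
--             exists = check_square(array, i, j, square_size)
--             if exists:
--                 return square_size
--
--     return check_array(array, square_size + 1)
-- ===== SOURCE B (Python) =====
-- def check_array(array, square_size=2):
--     n = len(array)
--     digits = list("0123456789")
--
--     def nums_ok(a, b, c):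
--         ds = [ch for v in (a, b, c) for ch in str(v) if ch.isdigit()]
--         return sorted(ds) == digits
--
--     s = square_size if square_size > 1 else 1  # sizes below 1 are meaningless
--     while s <= n:
--         for i in range(n - s + 1):
--             for j in range(n - s + 1):
--                 c1 = array[i][j]
--                 c2 = array[i][j + s - 1]
--                 c3 = array[i + s - 1][j + s - 1]
--                 c4 = array[i + s - 1][j]
--                 if any(nums_ok(x, y, z) for (x, y, z) in
--                        ((c1, c2, c3), (c1, c3, c4), (c1, c2, c4), (c2, c3, c4))):
--                     return s
--         s += 1
--     return 0
-- ===== Notes on version B (the rewrite author's own statement) =====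
-- stated objective: alternative
-- what changed: The recursive size-escalating driver becomes one explicit ascending loop over square sizes, and the duplicate-tracking seen-list of check_nums is replaced by collecting the digit characters of the three numbers and comparing their sorted list with '0123456789'.
-- outside the precondition, e.g. on check_array([[12, 345, 0], [0, 67890, 0], [0, 0, 0]], -1): A returns -1, B returns 2; on check_array([[12, 345, 0], [67890, 1, 2], [9]], 2): A returns 2, B returns 2
import Mathlib
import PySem

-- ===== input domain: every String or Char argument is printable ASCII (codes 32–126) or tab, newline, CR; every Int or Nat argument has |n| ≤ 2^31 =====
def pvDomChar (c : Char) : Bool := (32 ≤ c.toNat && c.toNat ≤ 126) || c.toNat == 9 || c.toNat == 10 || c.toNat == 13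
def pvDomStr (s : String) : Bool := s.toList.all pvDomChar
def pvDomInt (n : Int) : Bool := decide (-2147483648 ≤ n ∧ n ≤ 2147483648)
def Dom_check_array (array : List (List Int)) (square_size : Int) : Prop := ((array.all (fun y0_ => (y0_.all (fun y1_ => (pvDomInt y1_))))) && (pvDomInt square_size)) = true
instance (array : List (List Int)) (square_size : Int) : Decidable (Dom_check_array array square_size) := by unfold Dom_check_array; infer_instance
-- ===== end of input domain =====

-- B replaces A's recursive size-escalating driver by one explicit ascending loop over sizes and
-- replaces the seen-list duplicate scan of check_nums by a sorted-digits comparison (alternative decomposition, same cost).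

-- ===== PORT A =====
-- array[x][y]; Python raises IndexError when out of range — Pre_ excludes that, .getD 0 is never reached inside Pre_.
def pyCellA (array : List (List Int)) (x y : Int) : Int :=
  ((PySem.List.pyGet? array x).bind (fun row => PySem.List.pyGet? row y)).getD 0

-- the two nested for-loops of check_nums walk the concatenation of the three str(num) with one shared
-- early return and one shared seen-list; ported as one structural recursion over that character sequence.
def checkNumsLoop (seen : List Char) : List Char → Option (List Char)
  | [] => some seen
  | c :: rest =>
    if PySem.Chars.isdigit c then
      if seen.contains c then none
      else checkNumsLoop (seen ++ [c]) rest
    else checkNumsLoop seen rest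

def check_nums (num1 num2 num3 : Int) : Bool :=
  match checkNumsLoop [] (PySem.Int.toChars num1 ++ PySem.Int.toChars num2 ++ PySem.Int.toChars num3) with
  | none => false
  | some nums => nums.length == 10

def check_square (array : List (List Int)) (x y square_size : Int) : Bool :=
  let num1 := pyCellA array x y
  let num2 := pyCellA array x (y + square_size - 1)
  let num3 := pyCellA array (x + square_size - 1) (y + square_size - 1)
  let num4 := pyCellA array (x + square_size - 1) y
  check_nums num1 num2 num3 || check_nums num1 num3 num4 ||
    check_nums num1 num2 num4 || check_nums num2 num3 num4

def check_array (array : List (List Int)) (square_size : Int) : Int :=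
  if square_size > (array.length : Int) then 0
  else
    let bound := ((array.length : Int) - square_size + 1).toNat
    if (List.range bound).any (fun i =>
        (List.range bound).any (fun j => check_square array (i : Int) (j : Int) square_size))
    then square_size
    else check_array array (square_size + 1)
  termination_by ((array.length : Int) + 1 - square_size).toNat
  decreasing_by omega

-- ===== PORT B =====
def altDigits : List Char := ['0','1','2','3','4','5','6','7','8','9']

def altCell (array : List (List Int)) (x y : Int) : Int :=
  ((PySem.List.pyGet? array x).bind (fun row => PySem.List.pyGet? row y)).getD 0

def nums_ok (a b c : Int) : Bool :=
  let ds := (PySem.Int.toChars a ++ PySem.Int.toChars b ++ PySem.Int.toChars c).filter PySem.Chars.isdigit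
  PySem.List.sorted ds (fun x => x) false == altDigits

def altSquare (array : List (List Int)) (i j s : Int) : Bool :=
  let c1 := altCell array i j
  let c2 := altCell array i (j + s - 1)
  let c3 := altCell array (i + s - 1) (j + s - 1)
  let c4 := altCell array (i + s - 1) j
  [(c1, c2, c3), (c1, c3, c4), (c1, c2, c4), (c2, c3, c4)].any
    (fun t => nums_ok t.1 t.2.1 t.2.2)

def altLoop (array : List (List Int)) : List Int → Int
  | [] => 0
  | s :: rest =>
    let bound := ((array.length : Int) - s + 1).toNat
    if (List.range bound).any (fun i =>
        (List.range bound).any (fun j => altSquare array (i : Int) (j : Int) s))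
    then s
    else altLoop array rest

def check_array_alt (array : List (List Int)) (square_size : Int) : Int :=
  altLoop array (PySem.List.pyRange (max square_size 1) ((array.length : Int) + 1) 1)

-- ===== PRECONDITION & SPEC =====
-- Pre_ excludes square_size ≤ 0, where A's scan walks out of range (IndexError) after possibly
-- wrapping negative indices, and ragged arrays with a row shorter than the array, where A can raise
-- IndexError; on a few such inputs A still returns a value before hitting the bad index (see cites).
def Pre_check_array (array : List (List Int)) (square_size : Int) : Prop :=
  1 ≤ square_size ∧
    (square_size ≤ (array.length : Int) → ∀ row ∈ array, array.length ≤ row.length)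
instance (array : List (List Int)) (square_size : Int) : Decidable (Pre_check_array array square_size) := by
  unfold Pre_check_array; infer_instance

def pvWitness_check_array : List (List Int) × Int := ([[12, 345], [67890, 0]], 2)

def Spec_check_array (array : List (List Int)) (square_size : Int) (out : Int) : Prop := out = check_array_alt array square_size
instance (array : List (List Int)) (square_size : Int) (out : Int) : Decidable (Spec_check_array array square_size out) := by unfold Spec_check_array; infer_instance

-- ===== CLAIM (what is proved, stated in full; the proofs are below) =====
def Claim_equal_check_array : Prop := ∀ (array : List (List Int)) (square_size : Int), Dom_check_array array square_size → Pre_check_array array square_size → Spec_check_array array square_size (check_array array square_size)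

-- ===== LEMMAS AND PROOFS =====

lemma checkNumsLoop_spec (L : List Char) : ∀ seen : List Char,
    checkNumsLoop seen L =
      if (L.filter PySem.Chars.isdigit).Nodup ∧
          ∀ x ∈ L.filter PySem.Chars.isdigit, x ∉ seen
      then some (seen ++ L.filter PySem.Chars.isdigit) else none := by
  induction L with
  | nil => intro seen; simp [checkNumsLoop]
  | cons c rest ih =>
    intro seen
    by_cases hd : PySem.Chars.isdigit c
    · by_cases hm : c ∈ seen
      · simp [checkNumsLoop, hd, hm]
      · rw [show checkNumsLoop seen (c :: rest) = checkNumsLoop (seen ++ [c]) rest by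
          simp [checkNumsLoop, hd, hm]]
        rw [ih]
        have hfilter : (c :: rest).filter PySem.Chars.isdigit =
            c :: rest.filter PySem.Chars.isdigit := by simp [hd]
        rw [hfilter]
        by_cases h1 : (rest.filter PySem.Chars.isdigit).Nodup ∧
            ∀ x ∈ rest.filter PySem.Chars.isdigit, x ∉ seen ++ [c]
        · rw [if_pos h1, if_pos]
          · simp
          · constructor
            · simp only [List.nodup_cons]
              refine ⟨fun hc => (h1.2 c hc) (by simp), h1.1⟩
            · intro x hx
              simp only [List.mem_cons] at hx
              rcases hx with rfl | hx
              · exact hm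
              · intro hxs; exact h1.2 x hx (by simp [hxs])
        · rw [if_neg h1, if_neg]
          intro h2
          apply h1
          constructor
          · exact (List.nodup_cons.mp h2.1).2
          · intro x hx hmem
            simp only [List.mem_append, List.mem_singleton] at hmem
            rcases hmem with hxs | rfl
            · exact h2.2 x (by simp [hx]) hxs
            · exact (List.nodup_cons.mp h2.1).1 hx
    · rw [show checkNumsLoop seen (c :: rest) = checkNumsLoop seen rest by
        simp [checkNumsLoop, hd]]
      rw [ih]
      simp [hd]

lemma isdigit_mem_altDigits {c : Char} (h : PySem.Chars.isdigit c = true) :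
    c ∈ altDigits := by
  have h' : c.isDigit = true := h
  unfold Char.isDigit at h'
  simp only [Bool.and_eq_true, decide_eq_true_eq, ge_iff_le, UInt32.le_iff_toNat_le] at h'
  have h1 : 48 ≤ c.toNat := h'.1
  have h2 : c.toNat ≤ 57 := h'.2
  have hc : c = Char.ofNat c.toNat := (Char.ofNat_toNat c).symm
  set n := c.toNat with hn
  interval_cases n <;> rw [hc] <;> decide

lemma sorted_eq_digits_iff (ds : List Char)
    (hall : ∀ x ∈ ds, PySem.Chars.isdigit x = true) :
    PySem.List.sorted ds (fun x => x) false = altDigits ↔ ds.Nodup ∧ ds.length = 10 := by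
  constructor
  · intro h
    have hperm : ds.Perm altDigits := by
      have := PySem.List.sorted_perm ds (fun x : Char => x) false
      rw [h] at this
      exact this.symm
    exact ⟨hperm.nodup_iff.mpr (by decide), by
      have := hperm.length_eq; simpa using this⟩
  · rintro ⟨hnd, hlen⟩
    have hsub : ds ⊆ altDigits := fun x hx => isdigit_mem_altDigits (hall x hx)
    have hsp : ds.Subperm altDigits := hnd.subperm hsub
    have hperm : ds.Perm altDigits :=
      hsp.perm_of_length_le (by simp [altDigits, hlen])
    exact PySem.List.sorted_eq_of_perm_of_pairwise_lt ds altDigits (fun x => x) hperm.symm (by decide)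

lemma nums_eq (a b c : Int) : check_nums a b c = nums_ok a b c := by
  unfold check_nums nums_ok
  rw [checkNumsLoop_spec]
  set ds := (PySem.Int.toChars a ++ PySem.Int.toChars b ++ PySem.Int.toChars c).filter
      PySem.Chars.isdigit with hds
  have hall : ∀ x ∈ ds, PySem.Chars.isdigit x = true := by
    intro x hx; exact (List.mem_filter.mp hx).2
  by_cases hnd : ds.Nodup
  · rw [if_pos ⟨hnd, by simp⟩]
    simp only [List.nil_append]
    by_cases hlen : ds.length = 10
    · have := (sorted_eq_digits_iff ds hall).mpr ⟨hnd, hlen⟩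
      simp [this, hlen]
    · have : PySem.List.sorted ds (fun x => x) false ≠ altDigits := by
        intro h; exact hlen ((sorted_eq_digits_iff ds hall).mp h).2
      simp [hlen, this]
  · rw [if_neg (by tauto)]
    have : PySem.List.sorted ds (fun x => x) false ≠ altDigits := by
      intro h; exact hnd ((sorted_eq_digits_iff ds hall).mp h).1
    simp [this]

lemma square_eq (array : List (List Int)) (x y s : Int) :
    check_square array x y s = altSquare array x y s := by
  unfold check_square altSquare altCell pyCellA
  simp [nums_eq, List.any, Bool.or_assoc]

lemma pyRange_one_nil {a b : Int} (h : b ≤ a) : PySem.List.pyRange a b 1 = [] := by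
  simp [PySem.List.pyRange]
  omega

lemma driver_eq (array : List (List Int)) : ∀ (k : Nat) (s : Int), 1 ≤ s →
    (((array.length : Int) + 1 - s).toNat = k) →
    check_array array s = altLoop array (PySem.List.pyRange s ((array.length : Int) + 1) 1) := by
  intro k
  induction k with
  | zero =>
    intro s hs hk
    have hgt : (array.length : Int) < s := by omega
    rw [check_array, if_pos (by omega), pyRange_one_nil (by omega)]
    rfl
  | succ k ih =>
    intro s hs hk
    have hle : s ≤ (array.length : Int) := by omega
    rw [check_array, if_neg (by omega),
      PySem.List.pyRange_one_cons (by omega : s < (array.length : Int) + 1)]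
    simp only [altLoop, square_eq]
    split
    · rfl
    · exact ih (s + 1) (by omega) (by omega)

-- ===== VERDICT (by name: the statement is the Claim_ definition above) =====
theorem check_array_spec : Claim_equal_check_array := by
  intro array s _ hpre
  unfold Spec_check_array check_array_alt
  have hs := hpre.1
  have h1 : max s 1 = s := by omega
  rw [h1]
  exact driver_eq array (((array.length : Int) + 1 - s).toNat) s hpre.1 rfl
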